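-- pv_equiv track=rewrite | github.com/ylangtsou/tpu-inference | tpu_inference/distributed/offload/tpu_offload_connector.py | _decompose_into_buckets
-- ===== SOURCE A (Python) =====
-- BLOCK_SIZE_BUCKETS = [1, 2, 4, 8, 16]
--
-- def _decompose_into_buckets(num_blocks: int) -> list[int]:
--     """
--     Decomposes a number into a sum of numbers from the BLOCK_SIZE_BUCKETS
--     list using a greedy approach.
--     """
--     sorted_buckets = sorted(BLOCK_SIZE_BUCKETS, reverse=True)
--     chunks = []
--     remaining = num_blocks
--     while remaining > 0:
--         for bucket_size in sorted_buckets: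
--             if remaining >= bucket_size:
--                 chunks.append(bucket_size)
--                 remaining -= bucket_size
--                 break
--         else:
--             # This should not happen if 1 is in the buckets
--             raise ValueError(
--                 "Could not decompose number with the given buckets.")
--     return chunks
-- ===== SOURCE B (Python) =====
-- BLOCK_SIZE_BUCKETS = [1, 2, 4, 8, 16]
--
-- def _decompose_into_buckets(num_blocks: int) -> list[int]:
--     """Single pass over the buckets (descending): divmod counting instead of
--     the per-unit greedy while-loop; identical output order."""
--     if num_blocks <= 0:
--         return []
--     chunks = []
--     remaining = num_blocks
--     for bucket_size in sorted(BLOCK_SIZE_BUCKETS, reverse=True):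
--         count = remaining // bucket_size
--         chunks.extend([bucket_size] * count)
--         remaining %= bucket_size
--     return chunks
-- ===== Notes on version B (the rewrite author's own statement) =====
-- stated objective: faster
-- what changed: Replaced the per-unit greedy while-loop (one iteration per appended chunk, each rescanning the bucket list) by a single pass over the descending buckets using floor-division/modulo to emit each bucket's count at once; valid because the buckets are nested divisors.
import Mathlib
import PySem

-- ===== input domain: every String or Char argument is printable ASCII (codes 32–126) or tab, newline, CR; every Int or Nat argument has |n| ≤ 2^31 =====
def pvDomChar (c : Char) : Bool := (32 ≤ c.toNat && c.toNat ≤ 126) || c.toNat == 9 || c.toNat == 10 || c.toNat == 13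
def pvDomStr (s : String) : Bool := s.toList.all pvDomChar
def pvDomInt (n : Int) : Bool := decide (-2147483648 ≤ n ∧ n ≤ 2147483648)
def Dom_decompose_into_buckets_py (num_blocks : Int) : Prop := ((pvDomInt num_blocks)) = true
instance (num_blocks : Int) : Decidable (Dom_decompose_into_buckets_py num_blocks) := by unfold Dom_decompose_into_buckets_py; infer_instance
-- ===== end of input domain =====

-- B replaces A's per-unit greedy while-loop by one divmod pass over the descending buckets (objective: faster).

-- ===== PORT A =====
-- sorted(BLOCK_SIZE_BUCKETS, reverse=True)
def pvSortedBuckets : List Int := PySem.List.sorted ([1, 2, 4, 8, 16] : List Int) (fun x => x) true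

-- the while-loop of A: for each iteration, the inner `for ... break` is the first bucket with
-- remaining >= bucket_size (List.find?); the `else: raise ValueError` arm is unreachable
-- (1 is a bucket and remaining > 0), modelled by the `none` branch below.
def pvLoopA (remaining : Int) (chunks : List Int) : List Int :=
  if remaining > 0 then
    match hf : pvSortedBuckets.find? (fun b => decide (remaining ≥ b)) with
    | some b => pvLoopA (remaining - b) (chunks ++ [b])
    | none => chunks  -- ValueError (never reached for remaining > 0)
  else chunks
termination_by remaining.toNat
decreasing_by
  have hmem : b ∈ pvSortedBuckets := List.mem_of_find?_eq_some hf
  have hge : remaining ≥ b := by simpa using List.find?_some hf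
  have hb1 : (1 : Int) ≤ b := by
    have : pvSortedBuckets = [16, 8, 4, 2, 1] := by decide
    rw [this] at hmem
    fin_cases hmem <;> norm_num
  omega

def decompose_into_buckets_py (num_blocks : Int) : List Int := pvLoopA num_blocks []

-- ===== PORT B =====
def decompose_into_buckets_py_alt (num_blocks : Int) : List Int :=
  if num_blocks ≤ 0 then []
  else
    ((PySem.List.sorted ([1, 2, 4, 8, 16] : List Int) (fun x => x) true).foldl
      (fun (s : List Int × Int) bucket_size =>
        (s.1 ++ List.replicate (PySem.Int.floordiv s.2 bucket_size).toNat bucket_size,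
         PySem.Int.mod s.2 bucket_size))
      ([], num_blocks)).1

-- ===== PRECONDITION & SPEC =====
def Spec_decompose_into_buckets_py (num_blocks : Int) (out : List Int) : Prop := out = decompose_into_buckets_py_alt num_blocks
instance (num_blocks : Int) (out : List Int) : Decidable (Spec_decompose_into_buckets_py num_blocks out) := by unfold Spec_decompose_into_buckets_py; infer_instance

-- ===== CLAIM (what is proved, stated in full; the proofs are below) =====
def Claim_equal_decompose_into_buckets_py : Prop := ∀ (num_blocks : Int), Dom_decompose_into_buckets_py num_blocks → Spec_decompose_into_buckets_py num_blocks (decompose_into_buckets_py num_blocks)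

-- ===== LEMMAS AND PROOFS =====

lemma pvBuckets_eq : pvSortedBuckets = [16, 8, 4, 2, 1] := by decide

lemma pvBucketsB_eq : PySem.List.sorted ([1, 2, 4, 8, 16] : List Int) (fun x => x) true = [16, 8, 4, 2, 1] := by decide

lemma pvLoopA_step (n : Int) (c : List Int) (b : Int) (h0 : n > 0)
    (hb : pvSortedBuckets.find? (fun x => decide (n ≥ x)) = some b) :
    pvLoopA n c = pvLoopA (n - b) (c ++ [b]) := by
  rw [pvLoopA]
  rw [if_pos h0]
  split
  · rename_i b' hf
    rw [hb] at hf
    cases hf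
    rfl
  · rename_i hf
    rw [hb] at hf
    cases hf

lemma pvLoopA_nonpos (n : Int) (c : List Int) (h : ¬ n > 0) : pvLoopA n c = c := by
  rw [pvLoopA, if_neg h]

-- closed form of B's fold
lemma pvAlt_closed (n : Int) (h : 0 ≤ n) :
    decompose_into_buckets_py_alt n =
      List.replicate ((n / 16).toNat) 16 ++ List.replicate (((n % 16) / 8).toNat) 8 ++
      List.replicate (((n % 8) / 4).toNat) 4 ++ List.replicate (((n % 4) / 2).toNat) 2 ++
      List.replicate ((n % 2).toNat) 1 := by
  have fd : ∀ (a b : Int), 0 < b → PySem.Int.floordiv a b = a / b :=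
    fun a b hb => PySem.Int.floordiv_eq_ediv_of_pos hb
  have md : ∀ (a b : Int), 0 < b → PySem.Int.mod a b = a % b :=
    fun a b hb => PySem.Int.mod_eq_emod_of_pos hb
  by_cases h0 : n ≤ 0
  · have hn : n = 0 := le_antisymm h0 h
    subst hn
    simp [decompose_into_buckets_py_alt]
  · simp only [decompose_into_buckets_py_alt, if_neg h0, pvBucketsB_eq,
      List.foldl_cons, List.foldl_nil,
      fd _ 16 (by norm_num), md _ 16 (by norm_num),
      fd _ 8 (by norm_num), md _ 8 (by norm_num),
      fd _ 4 (by norm_num), md _ 4 (by norm_num),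
      fd _ 2 (by norm_num), md _ 2 (by norm_num),
      fd _ 1 (by norm_num), md _ 1 (by norm_num)]
    have e8 : n % 16 % 8 = n % 8 := by omega
    simp [e8]

lemma pvAlt_nonpos (n : Int) (h : n ≤ 0) : decompose_into_buckets_py_alt n = [] := by
  simp [decompose_into_buckets_py_alt, h]

lemma pvAlt_step16 (n : Int) (h : 16 ≤ n) :
    decompose_into_buckets_py_alt n = 16 :: decompose_into_buckets_py_alt (n - 16) := by
  rw [pvAlt_closed n (by omega), pvAlt_closed (n - 16) (by omega)]
  have e0 : (n / 16).toNat = ((n - 16) / 16).toNat + 1 := by omega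
  have e1 : n % 16 = (n - 16) % 16 := by omega
  have e2 : n % 8 = (n - 16) % 8 := by omega
  have e3 : n % 4 = (n - 16) % 4 := by omega
  have e4 : n % 2 = (n - 16) % 2 := by omega
  rw [e0, e1, e2, e3, e4, List.replicate_succ]
  simp

lemma pvAlt_step8 (n : Int) (h8 : 8 ≤ n) (h16 : n < 16) :
    decompose_into_buckets_py_alt n = 8 :: decompose_into_buckets_py_alt (n - 8) := by
  rw [pvAlt_closed n (by omega), pvAlt_closed (n - 8) (by omega)]
  have a0 : (n / 16).toNat = 0 := by omega
  have a1 : ((n % 16) / 8).toNat = 1 := by omega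
  have b0 : ((n - 8) / 16).toNat = 0 := by omega
  have b1 : (((n - 8) % 16) / 8).toNat = 0 := by omega
  have c4 : n % 8 = (n - 8) % 8 := by omega
  have c2 : n % 4 = (n - 8) % 4 := by omega
  have c1 : n % 2 = (n - 8) % 2 := by omega
  rw [a0, a1, b0, b1, c4, c2, c1]
  simp

lemma pvAlt_step4 (n : Int) (h4 : 4 ≤ n) (h8 : n < 8) :
    decompose_into_buckets_py_alt n = 4 :: decompose_into_buckets_py_alt (n - 4) := by
  rw [pvAlt_closed n (by omega), pvAlt_closed (n - 4) (by omega)]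
  have a0 : (n / 16).toNat = 0 := by omega
  have a1 : ((n % 16) / 8).toNat = 0 := by omega
  have a2 : ((n % 8) / 4).toNat = 1 := by omega
  have b0 : ((n - 4) / 16).toNat = 0 := by omega
  have b1 : (((n - 4) % 16) / 8).toNat = 0 := by omega
  have b2 : (((n - 4) % 8) / 4).toNat = 0 := by omega
  have c2 : n % 4 = (n - 4) % 4 := by omega
  have c1 : n % 2 = (n - 4) % 2 := by omega
  rw [a0, a1, a2, b0, b1, b2, c2, c1]
  simp

lemma pvAlt_step2 (n : Int) (h2 : 2 ≤ n) (h4 : n < 4) :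
    decompose_into_buckets_py_alt n = 2 :: decompose_into_buckets_py_alt (n - 2) := by
  rw [pvAlt_closed n (by omega), pvAlt_closed (n - 2) (by omega)]
  have a0 : (n / 16).toNat = 0 := by omega
  have a1 : ((n % 16) / 8).toNat = 0 := by omega
  have a2 : ((n % 8) / 4).toNat = 0 := by omega
  have a3 : ((n % 4) / 2).toNat = 1 := by omega
  have b0 : ((n - 2) / 16).toNat = 0 := by omega
  have b1 : (((n - 2) % 16) / 8).toNat = 0 := by omega
  have b2 : (((n - 2) % 8) / 4).toNat = 0 := by omega
  have b3 : (((n - 2) % 4) / 2).toNat = 0 := by omega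
  have c1 : n % 2 = (n - 2) % 2 := by omega
  rw [a0, a1, a2, a3, b0, b1, b2, b3, c1]
  simp

lemma pvAlt_step1 (n : Int) (h1 : 1 ≤ n) (h2 : n < 2) :
    decompose_into_buckets_py_alt n = 1 :: decompose_into_buckets_py_alt (n - 1) := by
  have hn : n = 1 := by omega
  subst hn
  decide

lemma pvMain (k : Nat) : ∀ n : Int, n.toNat ≤ k → ∀ c : List Int,
    pvLoopA n c = c ++ decompose_into_buckets_py_alt n := by
  induction k with
  | zero =>
    intro n hn c
    rw [pvLoopA_nonpos n c (by omega), pvAlt_nonpos n (by omega)]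
    simp
  | succ k ih =>
    intro n hn c
    by_cases h0 : n ≤ 0
    · rw [pvLoopA_nonpos n c (by omega), pvAlt_nonpos n h0]; simp
    by_cases h16 : 16 ≤ n
    · rw [pvLoopA_step n c 16 (by omega)
        (by rw [pvBuckets_eq]; exact List.find?_cons_of_pos (by simp; omega))]
      rw [ih (n - 16) (by omega) (c ++ [16]), pvAlt_step16 n h16]
      simp
    by_cases h8 : 8 ≤ n
    · rw [pvLoopA_step n c 8 (by omega)
        (by rw [pvBuckets_eq]
            rw [List.find?_cons_of_neg (by simp; omega)]
            exact List.find?_cons_of_pos (by simp; omega))]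
      rw [ih (n - 8) (by omega) (c ++ [8]), pvAlt_step8 n h8 (by omega)]
      simp
    by_cases h4 : 4 ≤ n
    · rw [pvLoopA_step n c 4 (by omega)
        (by rw [pvBuckets_eq]
            rw [List.find?_cons_of_neg (by simp; omega), List.find?_cons_of_neg (by simp; omega)]
            exact List.find?_cons_of_pos (by simp; omega))]
      rw [ih (n - 4) (by omega) (c ++ [4]), pvAlt_step4 n h4 (by omega)]
      simp
    by_cases h2 : 2 ≤ n
    · rw [pvLoopA_step n c 2 (by omega)
        (by rw [pvBuckets_eq]
            rw [List.find?_cons_of_neg (by simp; omega), List.find?_cons_of_neg (by simp; omega),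
              List.find?_cons_of_neg (by simp; omega)]
            exact List.find?_cons_of_pos (by simp; omega))]
      rw [ih (n - 2) (by omega) (c ++ [2]), pvAlt_step2 n h2 (by omega)]
      simp
    · rw [pvLoopA_step n c 1 (by omega)
        (by rw [pvBuckets_eq]
            rw [List.find?_cons_of_neg (by simp; omega), List.find?_cons_of_neg (by simp; omega),
              List.find?_cons_of_neg (by simp; omega), List.find?_cons_of_neg (by simp; omega)]
            exact List.find?_cons_of_pos (by simp; omega))]
      rw [ih (n - 1) (by omega) (c ++ [1]), pvAlt_step1 n (by omega) (by omega)]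
      simp

-- ===== VERDICT (by name: the statement is the Claim_ definition above) =====
theorem decompose_into_buckets_py_spec : Claim_equal_decompose_into_buckets_py := by
  intro n _
  unfold Spec_decompose_into_buckets_py decompose_into_buckets_py
  simpa using pvMain n.toNat n le_rfl []
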